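-- pv_equiv track=rewrite | github.com/antarn88/NetworkAssistant | modules/NumberConversion.py | get_corrected_number
-- ===== SOURCE A (Python) =====
-- def get_corrected_number(number):
--     only_zeros = True
--     for i in number:
--         if not i == "0":
--             only_zeros = False
--     if not only_zeros:
--         count_zero = 0
--         if number[0] == "0":
--             for i in number:
--                 if i == "0":
--                     count_zero += 1
--                 if not i == "0":
--                     break
--             return number[count_zero:]
--         return number
--     return "0"
-- ===== SOURCE B (Python) =====
-- def get_corrected_number(number):
--     for idx, c in enumerate(number):
--         if c != "0":
--             return number[idx:]
--     return "0"
-- ===== Notes on version B (the rewrite author's own statement) =====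
-- stated objective: simpler
-- what changed: B replaces A's two full scans (an only_zeros flag pass plus a leading-zero counting pass with a break) by a single enumerate scan that slices at the first non-zero character, falling through to the zero string for empty or all-zero input.
import Mathlib
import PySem

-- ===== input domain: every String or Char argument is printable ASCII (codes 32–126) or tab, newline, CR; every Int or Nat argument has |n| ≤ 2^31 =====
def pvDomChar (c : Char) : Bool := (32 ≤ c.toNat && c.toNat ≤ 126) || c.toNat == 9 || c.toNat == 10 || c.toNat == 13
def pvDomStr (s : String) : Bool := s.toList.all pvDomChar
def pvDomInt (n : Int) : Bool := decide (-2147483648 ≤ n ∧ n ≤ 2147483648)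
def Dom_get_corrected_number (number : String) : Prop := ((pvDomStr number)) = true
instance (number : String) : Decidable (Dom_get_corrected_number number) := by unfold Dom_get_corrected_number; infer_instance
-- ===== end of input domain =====

-- B strips leading zeros with one enumerate scan instead of A's two full scans (only_zeros flag pass + counting pass); objective: simpler.

-- ===== PORT A =====
-- the second for-loop of A: count leading '0's, break at the first other char
def pvCountZero : List Char → Int → Int
  | [], c => c
  | i :: rest, c => if i = '0' then pvCountZero rest (c + 1) else c

def get_corrected_number (number : String) : String :=
  let cs := number.toList
  let only_zeros := cs.foldl (fun b i => if ¬ (i = '0') then false else b) true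
  if ¬ only_zeros then
    if PySem.Str.pyGet? number 0 = some '0' then
      let count_zero := pvCountZero cs 0
      String.ofList (PySem.List.slice cs (some count_zero) none)
    else number
  else "0"

-- ===== PORT B =====
-- the for idx, c in enumerate(number) loop of B
def pvAltLoop (number : String) : List (Int × Char) → String
  | [] => "0"
  | (idx, c) :: rest =>
    if c ≠ '0' then String.ofList (PySem.List.slice number.toList (some idx) none)
    else pvAltLoop number rest

def get_corrected_number_alt (number : String) : String :=
  pvAltLoop number (PySem.List.enumerate number.toList 0)

-- ===== PRECONDITION & SPEC =====
def Spec_get_corrected_number (number : String) (out : String) : Prop := out = get_corrected_number_alt number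
instance (number : String) (out : String) : Decidable (Spec_get_corrected_number number out) := by unfold Spec_get_corrected_number; infer_instance

-- ===== CLAIM (what is proved, stated in full; the proofs are below) =====
def Claim_equal_get_corrected_number : Prop := ∀ (number : String), Dom_get_corrected_number number → Spec_get_corrected_number number (get_corrected_number number)

-- ===== LEMMAS AND PROOFS =====

theorem pvFoldA_eq (cs : List Char) (b : Bool) :
    cs.foldl (fun b i => if ¬ (i = '0') then false else b) b = (b && cs.all (· == '0')) := by
  induction cs generalizing b with
  | nil => simp
  | cons x xs ih =>
    simp only [List.foldl, List.all_cons, ih]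
    by_cases h : x = '0' <;> simp [h]

theorem pvCountZero_eq (cs : List Char) (c : Int) :
    pvCountZero cs c = c + (cs.takeWhile (· == '0')).length := by
  induction cs generalizing c with
  | nil => simp [pvCountZero]
  | cons x xs ih =>
    by_cases h : x = '0'
    · simp [pvCountZero, h, ih]; ring
    · simp [pvCountZero, h]

theorem pvAltLoop_eq (number : String) (cs : List Char) (k : Int) :
    pvAltLoop number (PySem.List.enumerate cs k) =
      if cs.all (· == '0') then "0"
      else String.ofList (PySem.List.slice number.toList
        (some (k + ((cs.takeWhile (· == '0')).length : Int))) none) := by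
  induction cs generalizing k with
  | nil => simp [PySem.List.enumerate, pvAltLoop]
  | cons x xs ih =>
    by_cases h : x = '0'
    · subst h
      simp [PySem.List.enumerate, pvAltLoop, ih]
      split
      · rfl
      · congr 3
        ring
    · simp [PySem.List.enumerate, pvAltLoop, h, List.all_cons]

-- ===== VERDICT (by name: the statement is the Claim_ definition above) =====
theorem get_corrected_number_spec : Claim_equal_get_corrected_number := by
  intro number _
  unfold Spec_get_corrected_number get_corrected_number get_corrected_number_alt
  rw [pvAltLoop_eq]
  simp only [pvFoldA_eq, Bool.true_and]
  by_cases hall : number.toList.all (· == '0') = true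
  · simp [hall]
  · have hne : number.toList ≠ [] := fun h => hall (by simp [h])
    obtain ⟨x, xs, hx⟩ := List.exists_cons_of_ne_nil hne
    by_cases h0 : x = '0'
    · have hget : PySem.Str.pyGet? number 0 = some '0' := by
        simp [PySem.Str.pyGet?, hx, h0]
      simp only [hall, Bool.false_eq_true, not_false_eq_true, if_true, hget,
        pvCountZero_eq, if_false]
    · have hget : ¬ PySem.Str.pyGet? number 0 = some '0' := by
        simp [PySem.Str.pyGet?, hx, h0]
      have htw : number.toList.takeWhile (· == '0') = [] := by
        simp [hx, h0]
      simp only [hall, Bool.false_eq_true, not_false_eq_true, if_true, if_neg hget, htw,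
        List.length_nil, Nat.cast_zero, add_zero, if_false]
      simp [PySem.List.slice_zero_start, PySem.List.slice_none_none]
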